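-- pv_equiv track=rewrite | github.com/DuyHaKhuong/leetcode | Leetcode/people-whose-list-of-favorite-companies-is-not-a-subset-of-another-list.py | peopleIndexes
-- ===== SOURCE A (Python) =====
-- from typing import List
--
-- def peopleIndexes(favoriteCompanies: List[List[str]]) -> List[int]:
--     results = []
--     company_sets = {
--         i: set(companies) for i, companies in enumerate(favoriteCompanies)
--     }
--     n = len(favoriteCompanies)
--     for i, companies in company_sets.items():
--         is_subset = False
--         for j in range(n):
--             other_companies = company_sets[j]
--             if i != j and companies.issubset(other_companies):
--                 is_subset = True
--                 break
--         if not is_subset: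
--             results.append(i)
--     return results
-- ===== SOURCE B (Python) =====
-- def peopleIndexes(favoriteCompanies):
--     n = len(favoriteCompanies)
--     # inverted index: company -> set of people having it
--     occ = {}
--     for j, companies in enumerate(favoriteCompanies):
--         for c in companies:
--             occ.setdefault(c, set()).add(j)
--     everyone = set(range(n))
--     results = []
--     for i, companies in enumerate(favoriteCompanies):
--         cand = everyone
--         for c in companies:
--             cand = cand & occ[c]
--         # cand = people whose list contains all of person i's companies; i is always in it
--         if len(cand) == 1:
--             results.append(i)
--     return results
-- ===== Notes on version B (the rewrite author's own statement) =====
-- stated objective: alternative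
-- what changed: Replaced A's per-person subset test against every other person's set by an inverted index company->set of people: person i's survivors are the intersection of the index entries of i's own companies, and i is kept iff that intersection is {i}.
import Mathlib
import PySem

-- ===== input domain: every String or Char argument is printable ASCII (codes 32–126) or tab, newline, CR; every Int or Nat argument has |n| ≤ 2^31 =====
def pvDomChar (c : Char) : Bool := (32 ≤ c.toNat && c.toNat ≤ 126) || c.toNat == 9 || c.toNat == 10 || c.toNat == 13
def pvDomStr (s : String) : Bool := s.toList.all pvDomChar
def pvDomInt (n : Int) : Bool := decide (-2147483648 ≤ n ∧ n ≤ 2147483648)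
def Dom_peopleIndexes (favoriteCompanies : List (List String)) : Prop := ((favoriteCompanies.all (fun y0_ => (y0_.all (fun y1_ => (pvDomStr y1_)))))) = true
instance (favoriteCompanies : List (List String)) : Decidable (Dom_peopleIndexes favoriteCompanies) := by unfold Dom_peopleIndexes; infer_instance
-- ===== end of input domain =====

-- B replaces A's per-person scan of all other people's sets by an inverted index
-- company -> set of people, intersecting the index entries of a person's own companies
-- (objective: alternative algorithm; equal return value proved below).

-- ===== PORT A =====
-- inner 'for j in range(n): … break' loop of A (returns is_subset)
-- company_sets[j] always finds key j (keys are exactly 0..n-1), so getD is exact here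
def pvAScan (d : PySem.Dict Int (PySem.Set String)) (i : Int) (companies : PySem.Set String) : List Int → Bool
  | [] => false
  | j :: rest =>
      let other := d.getD j PySem.Set.empty
      if (decide (i ≠ j) && PySem.Set.issubset companies other) then true
      else pvAScan d i companies rest

def peopleIndexes (favoriteCompanies : List (List String)) : List Int :=
  let companySets : PySem.Dict Int (PySem.Set String) :=
    (PySem.List.enumerate favoriteCompanies).foldl
      (fun d p => d.insert p.1 (PySem.Set.ofList p.2)) PySem.Dict.empty
  let n : Int := favoriteCompanies.length
  companySets.items.foldl
    (fun results p =>
      let isSubset := pvAScan companySets p.1 p.2 (PySem.List.pyRange 0 n 1)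
      if isSubset = false then results ++ [p.1] else results) []

-- ===== PORT B =====
-- occ[c] in the second loop always finds key c (inserted in the first loop), so getD is exact
def peopleIndexes_alt (favoriteCompanies : List (List String)) : List Int :=
  let n : Int := favoriteCompanies.length
  let occ : PySem.Dict String (PySem.Set Int) :=
    (PySem.List.enumerate favoriteCompanies).foldl
      (fun d p => p.2.foldl (fun d c => d.modify c PySem.Set.empty (fun s => PySem.Set.add s p.1)) d)
      PySem.Dict.empty
  let everyone : PySem.Set Int := PySem.Set.ofList (PySem.List.pyRange 0 n 1)
  (PySem.List.enumerate favoriteCompanies).foldl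
    (fun results p =>
      let cand := p.2.foldl (fun cand c => PySem.Set.inter cand (occ.getD c PySem.Set.empty)) everyone
      if PySem.Set.len cand == 1 then results ++ [p.1] else results) []

-- ===== PRECONDITION & SPEC =====
def Spec_peopleIndexes (favoriteCompanies : List (List String)) (out : List Int) : Prop := out = peopleIndexes_alt favoriteCompanies
instance (favoriteCompanies : List (List String)) (out : List Int) : Decidable (Spec_peopleIndexes favoriteCompanies out) := by unfold Spec_peopleIndexes; infer_instance

-- ===== CLAIM (what is proved, stated in full; the proofs are below) =====
def Claim_equal_peopleIndexes : Prop := ∀ (favoriteCompanies : List (List String)), Dom_peopleIndexes favoriteCompanies → Spec_peopleIndexes favoriteCompanies (peopleIndexes favoriteCompanies)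

-- ===== LEMMAS AND PROOFS =====

-- membership in the inverted index after the inner loop of one person
theorem pv_occ_inner (cs : List String) (i : Int) (d : PySem.Dict String (PySem.Set Int)) (c : String) (j : Int) :
    j ∈ (cs.foldl (fun d c' => d.modify c' PySem.Set.empty (fun s => PySem.Set.add s i)) d).getD c PySem.Set.empty ↔
      j ∈ d.getD c PySem.Set.empty ∨ (c ∈ cs ∧ j = i) := by
  induction cs generalizing d with
  | nil => simp
  | cons c0 cs ih =>
    simp only [List.foldl_cons, ih, PySem.Dict.getD_modify, List.mem_cons]
    by_cases h : c = c0
    · subst h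
      simp only [if_true, PySem.Set.mem_add, true_or, true_and]
      tauto
    · rw [if_neg h]
      constructor
      · rintro (h1 | ⟨h2, h3⟩)
        exacts [Or.inl h1, Or.inr ⟨Or.inr h2, h3⟩]
      · rintro (h1 | ⟨(rfl | h2), h3⟩)
        exacts [Or.inl h1, absurd rfl h, Or.inr ⟨h2, h3⟩]

-- membership in the inverted index after the whole building loop
theorem pv_occ_mem (ps : List (Int × List String)) (d : PySem.Dict String (PySem.Set Int)) (c : String) (j : Int) :
    j ∈ (ps.foldl (fun d p => p.2.foldl (fun d c' => d.modify c' PySem.Set.empty (fun s => PySem.Set.add s p.1)) d) d).getD c PySem.Set.empty ↔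
      j ∈ d.getD c PySem.Set.empty ∨ ∃ p ∈ ps, c ∈ p.2 ∧ j = p.1 := by
  induction ps generalizing d with
  | nil => simp
  | cons p ps ih =>
    simp only [List.foldl_cons, ih, pv_occ_inner, List.mem_cons]
    constructor
    · rintro ((h | h) | ⟨q, hq, h⟩)
      exacts [Or.inl h, Or.inr ⟨p, Or.inl rfl, h⟩, Or.inr ⟨q, Or.inr hq, h⟩]
    · rintro (h | ⟨q, (rfl | hq), h⟩)
      exacts [Or.inl (Or.inl h), Or.inl (Or.inr h), Or.inr ⟨q, hq, h⟩]

-- membership in the intersection loop of B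
theorem pv_cand_mem (occ : PySem.Dict String (PySem.Set Int)) (cs : List String) (s : PySem.Set Int) (j : Int) :
    j ∈ cs.foldl (fun cand c => PySem.Set.inter cand (occ.getD c PySem.Set.empty)) s ↔
      j ∈ s ∧ ∀ c ∈ cs, j ∈ occ.getD c PySem.Set.empty := by
  induction cs generalizing s with
  | nil => simp
  | cons c0 cs ih =>
    simp only [List.foldl_cons, ih, PySem.Set.mem_inter, List.mem_cons]
    constructor
    · rintro ⟨⟨h1, h2⟩, h3⟩; exact ⟨h1, by rintro c (rfl | hc); exacts [h2, h3 c hc]⟩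
    · rintro ⟨h1, h2⟩; exact ⟨⟨h1, h2 c0 (Or.inl rfl)⟩, fun c hc => h2 c (Or.inr hc)⟩

-- the intersection loop preserves Nodup
theorem pv_cand_nodup (occ : PySem.Dict String (PySem.Set Int)) (cs : List String) (s : PySem.Set Int) (hs : s.Nodup) :
    (cs.foldl (fun cand c => PySem.Set.inter cand (occ.getD c PySem.Set.empty)) s).Nodup := by
  induction cs generalizing s with
  | nil => exact hs
  | cons c0 cs ih => exact ih _ (PySem.Set.nodup_inter _ _ hs)

-- a Nodup list containing i has length 1 iff every member equals i
theorem pv_len_one_iff {l : List Int} {i : Int} (hnd : l.Nodup) (hi : i ∈ l) :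
    l.length = 1 ↔ ∀ j ∈ l, j = i := by
  constructor
  · intro h j hj
    obtain ⟨a, rfl⟩ := List.length_eq_one_iff.mp h
    simp_all
  · intro h2
    cases l with
    | nil => simp at hi
    | cons a t =>
      have ha : a = i := h2 a (List.mem_cons_self ..)
      have ht : t = [] := by
        cases t with
        | nil => rfl
        | cons b u =>
          have hb : b = i := h2 b (by simp)
          simp [ha, hb] at hnd
      simp [ht]

-- A's inner scan returns true iff some other index in the scanned list is a superset
theorem pv_aScan_iff (d : PySem.Dict Int (PySem.Set String)) (i : Int) (s : PySem.Set String) (js : List Int) :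
    pvAScan d i s js = true ↔ ∃ j ∈ js, i ≠ j ∧ PySem.Set.issubset s (d.getD j PySem.Set.empty) = true := by
  induction js with
  | nil => simp [pvAScan]
  | cons j js ih =>
    cases hb : (decide (i ≠ j) && PySem.Set.issubset s (d.getD j PySem.Set.empty)) with
    | true =>
      simp only [Bool.and_eq_true, decide_eq_true_eq] at hb
      simp only [pvAScan, List.mem_cons]
      rw [if_pos (by simpa using hb)]
      simp only [true_iff]
      exact ⟨j, Or.inl rfl, hb.1, hb.2⟩
    | false =>
      have hb' : ¬ ((decide (i ≠ j) && PySem.Set.issubset s (d.getD j PySem.Set.empty)) = true) := by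
        intro h; rw [hb] at h; exact Bool.false_ne_true h
      simp only [pvAScan, List.mem_cons]
      rw [if_neg hb']
      simp only [Bool.and_eq_true, decide_eq_true_eq, not_and] at hb'
      rw [ih]
      constructor
      · rintro ⟨k, hk, h1, h2⟩; exact ⟨k, Or.inr hk, h1, h2⟩
      · rintro ⟨k, (rfl | hk), h1, h2⟩
        · exact absurd h2 (hb' h1)
        · exact ⟨k, hk, h1, h2⟩

-- abbreviations for the two dictionaries built by the ports (proof-only helpers)
def pvCS (fav : List (List String)) : PySem.Dict Int (PySem.Set String) :=
  (PySem.List.enumerate fav).foldl (fun d p => d.insert p.1 (PySem.Set.ofList p.2)) PySem.Dict.empty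

def pvOccD (fav : List (List String)) : PySem.Dict String (PySem.Set Int) :=
  (PySem.List.enumerate fav).foldl
    (fun d p => p.2.foldl (fun d c => d.modify c PySem.Set.empty (fun s => PySem.Set.add s p.1)) d)
    PySem.Dict.empty

theorem pv_items (fav : List (List String)) :
    (pvCS fav).items = (PySem.List.enumerate fav).map (fun p => (p.1, PySem.Set.ofList p.2)) := by
  unfold pvCS
  rw [PySem.Dict.items_foldl_insert_fresh (PySem.List.enumerate fav) Prod.fst
        (fun p => PySem.Set.ofList p.2) PySem.Dict.empty
        (fun a _ => PySem.Dict.contains_empty a.1)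
        (by rw [PySem.List.map_fst_enumerate]; exact PySem.List.nodup_pyRange_one _ _)]
  rfl

theorem pv_keys_nodup (fav : List (List String)) : (pvCS fav).keys.Nodup := by
  have : (pvCS fav).keys = (pvCS fav).items.map (·.1) := rfl
  rw [this, pv_items, List.map_map]
  have : ((fun p : Int × PySem.Set String => p.1) ∘ fun p : Int × List String => (p.1, PySem.Set.ofList p.2))
       = fun p : Int × List String => p.1 := rfl
  rw [this, PySem.List.map_fst_enumerate]
  exact PySem.List.nodup_pyRange_one _ _

theorem pv_getD (fav : List (List String)) (m : Nat) (hm : m < fav.length) :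
    (pvCS fav).getD (m : Int) PySem.Set.empty = PySem.Set.ofList fav[m] := by
  apply PySem.Dict.getD_of_mem_items _ _ (pv_keys_nodup fav)
  rw [pv_items]
  exact List.mem_map.mpr ⟨((m : Int), fav[m]),
    (PySem.List.mem_enumerate_iff fav 0 _).mpr ⟨m, hm, by simp⟩, rfl⟩

theorem pv_occD (fav : List (List String)) (c : String) (j : Int) :
    j ∈ (pvOccD fav).getD c PySem.Set.empty ↔
      ∃ (m : Nat), ∃ _ : m < fav.length, c ∈ fav[m] ∧ j = (m : Int) := by
  unfold pvOccD
  rw [pv_occ_mem]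
  simp only [PySem.Dict.getD_empty]
  constructor
  · rintro (h | ⟨p, hp, hc, rfl⟩)
    · simp [PySem.Set.empty] at h
    · obtain ⟨m, hm, rfl⟩ := (PySem.List.mem_enumerate_iff fav 0 p).mp hp
      exact ⟨m, hm, hc, by simp⟩
  · rintro ⟨m, hm, hc, rfl⟩
    exact Or.inr ⟨((m : Int), fav[m]),
      (PySem.List.mem_enumerate_iff fav 0 _).mpr ⟨m, hm, by simp⟩, hc, rfl⟩

-- the pointwise equivalence of A's scan condition and B's intersection condition
theorem pv_point (fav : List (List String)) (k : Nat) (hk : k < fav.length) :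
    (pvAScan (pvCS fav) (k : Int) (PySem.Set.ofList fav[k])
        (PySem.List.pyRange 0 (fav.length : Int) 1) = false) ↔
    (PySem.Set.len (fav[k].foldl
        (fun cand c => PySem.Set.inter cand ((pvOccD fav).getD c PySem.Set.empty))
        (PySem.Set.ofList (PySem.List.pyRange 0 (fav.length : Int) 1))) == 1) = true := by
  have hnd : (fav[k].foldl
      (fun cand c => PySem.Set.inter cand ((pvOccD fav).getD c PySem.Set.empty))
      (PySem.Set.ofList (PySem.List.pyRange 0 (fav.length : Int) 1))).Nodup :=
    pv_cand_nodup _ _ _ (PySem.Set.nodup_ofList _)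
  have hkc : (k : Int) ∈ fav[k].foldl
      (fun cand c => PySem.Set.inter cand ((pvOccD fav).getD c PySem.Set.empty))
      (PySem.Set.ofList (PySem.List.pyRange 0 (fav.length : Int) 1)) := by
    rw [pv_cand_mem]
    refine ⟨(PySem.Set.mem_ofList _ _).mpr (PySem.List.mem_pyRange_one.mpr
      ⟨Int.natCast_nonneg k, by exact_mod_cast hk⟩), fun c hc => ?_⟩
    exact (pv_occD fav c _).mpr ⟨k, hk, hc, rfl⟩
  have hlen : (PySem.Set.len (fav[k].foldl
      (fun cand c => PySem.Set.inter cand ((pvOccD fav).getD c PySem.Set.empty))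
      (PySem.Set.ofList (PySem.List.pyRange 0 (fav.length : Int) 1))) == 1) = true ↔
      (fav[k].foldl
      (fun cand c => PySem.Set.inter cand ((pvOccD fav).getD c PySem.Set.empty))
      (PySem.Set.ofList (PySem.List.pyRange 0 (fav.length : Int) 1))).length = 1 := by
    simp [PySem.Set.len]
  rw [hlen, pv_len_one_iff hnd hkc, Bool.eq_false_iff, Ne, pv_aScan_iff]
  constructor
  · intro h j hj
    by_contra hne
    obtain ⟨hjr, hall⟩ := (pv_cand_mem _ _ _ _).mp hj
    have hjr' := PySem.List.mem_pyRange_one.mp ((PySem.Set.mem_ofList _ _).mp hjr)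
    obtain ⟨m, rfl⟩ : ∃ m : Nat, j = (m : Int) := ⟨j.toNat, (Int.toNat_of_nonneg hjr'.1).symm⟩
    have hm : m < fav.length := by exact_mod_cast hjr'.2
    apply h
    refine ⟨(m : Int), PySem.List.mem_pyRange_one.mpr ⟨Int.natCast_nonneg m, by exact_mod_cast hm⟩,
      fun e => hne e.symm, ?_⟩
    rw [pv_getD fav m hm, PySem.Set.issubset_iff]
    intro c hc
    obtain ⟨m', hm', hc', he⟩ := (pv_occD fav c _).mp (hall c ((PySem.Set.mem_ofList _ _).mp hc))
    have : m' = m := by exact_mod_cast he.symm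
    subst this
    exact (PySem.Set.mem_ofList _ _).mpr hc'
  · rintro h ⟨j, hjr, hne, hsub⟩
    have hjr' := PySem.List.mem_pyRange_one.mp hjr
    obtain ⟨m, rfl⟩ : ∃ m : Nat, j = (m : Int) := ⟨j.toNat, (Int.toNat_of_nonneg hjr'.1).symm⟩
    have hm : m < fav.length := by exact_mod_cast hjr'.2
    rw [pv_getD fav m hm, PySem.Set.issubset_iff] at hsub
    have : (m : Int) ∈ fav[k].foldl
        (fun cand c => PySem.Set.inter cand ((pvOccD fav).getD c PySem.Set.empty))
        (PySem.Set.ofList (PySem.List.pyRange 0 (fav.length : Int) 1)) := by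
      rw [pv_cand_mem]
      refine ⟨(PySem.Set.mem_ofList _ _).mpr hjr, fun c hc => ?_⟩
      exact (pv_occD fav c _).mpr ⟨m, hm,
        (PySem.Set.mem_ofList _ _).mp (hsub c ((PySem.Set.mem_ofList _ _).mpr hc)), rfl⟩
    exact hne (h _ this).symm

-- ===== VERDICT (by name: the statement is the Claim_ definition above) =====
theorem peopleIndexes_spec : Claim_equal_peopleIndexes := by
  intro fav _
  unfold Spec_peopleIndexes
  have hA : peopleIndexes fav = (pvCS fav).items.foldl
      (fun results p =>
        if pvAScan (pvCS fav) p.1 p.2 (PySem.List.pyRange 0 (fav.length : Int) 1) = false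
        then results ++ [p.1] else results) [] := rfl
  have hB : peopleIndexes_alt fav = (PySem.List.enumerate fav).foldl
      (fun results p =>
        if PySem.Set.len (p.2.foldl
            (fun cand c => PySem.Set.inter cand ((pvOccD fav).getD c PySem.Set.empty))
            (PySem.Set.ofList (PySem.List.pyRange 0 (fav.length : Int) 1))) == 1
        then results ++ [p.1] else results) [] := rfl
  rw [hA, hB, pv_items, List.foldl_map]
  apply PySem.List.foldl_congr_mem'
  intro p hp acc
  obtain ⟨k, hk, rfl⟩ := (PySem.List.mem_enumerate_iff fav 0 p).mp hp
  simp only [zero_add]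
  have hpt := pv_point fav k hk
  by_cases h : pvAScan (pvCS fav) (k : Int) (PySem.Set.ofList fav[k])
      (PySem.List.pyRange 0 (fav.length : Int) 1) = false
  · rw [if_pos h, if_pos (hpt.mp h)]
  · rw [if_neg h, if_neg (fun hb => h (hpt.mpr hb))]
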